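-- pv_equiv track=rewrite | github.com/minchey/baekjoons | max_count.py | solution
-- ===== SOURCE A (Python) =====
-- def solution(array):
--     answer_list = []
--     for i in set(array):
--         a = array.count(i)
--         answer_list.append(a)
--         if a == max(answer_list):
--             answer = i
--     if answer_list.count(max(answer_list)) > 1 :
--         answer = -1
--     return answer
-- ===== SOURCE B (Python) =====
-- def solution(array):
--     counts = {}
--     for x in array:
--         counts[x] = counts.get(x, 0) + 1
--     best_cnt = 0
--     best_val = -1
--     tie = False
--     for v, c in counts.items():
--         if c > best_cnt:
--             best_cnt = c
--             best_val = v
--             tie = False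
--         elif c == best_cnt:
--             tie = True
--     return -1 if tie else best_val
-- ===== Notes on version B (the rewrite author's own statement) =====
-- stated objective: faster
-- what changed: B builds a counting dict in one pass over the array and then scans its (value, count) items once, tracking the running best count, its element and a tie flag, instead of A's loop over set(array) that rescans the whole array with array.count for each distinct element and recomputes max(answer_list) on every iteration plus a final answer_list.count pass.
-- outside the precondition, e.g. on solution([]): A raises ValueError, B returns -1
-- crash fix: On the empty list A raises ValueError (max() of the empty answer_list) while B returns -1, the 'no unique maximum' sentinel. — e.g. on solution([]): A raises ValueError, B returns -1
import Mathlib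
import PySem

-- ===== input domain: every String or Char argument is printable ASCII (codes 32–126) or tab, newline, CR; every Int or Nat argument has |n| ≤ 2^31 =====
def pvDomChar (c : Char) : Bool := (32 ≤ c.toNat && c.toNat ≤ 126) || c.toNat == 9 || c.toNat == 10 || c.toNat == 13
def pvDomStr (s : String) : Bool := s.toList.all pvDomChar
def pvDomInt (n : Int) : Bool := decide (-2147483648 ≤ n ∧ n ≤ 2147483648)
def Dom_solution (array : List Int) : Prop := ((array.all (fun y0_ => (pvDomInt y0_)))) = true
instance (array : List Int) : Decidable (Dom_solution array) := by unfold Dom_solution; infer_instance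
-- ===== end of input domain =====

-- B replaces A's per-distinct-element array.count scan (and max() recomputation) with one counting
-- dict pass plus one running best/tie scan over its items: objective 'faster'. Return value only.

-- ===== PORT A =====
-- one loop iteration of A: append a = array.count(i) to answer_list, set answer := i when a == max(answer_list)
def stepA (cnt : Int → Int) (st : List Int × Int) (i : Int) : List Int × Int :=
  let a : Int := cnt i
  let l := st.1 ++ [a]
  if PySem.List.max? l (fun y => y) = some a then (l, i) else (l, st.2)

-- A's final lines: 'if answer_list.count(max(answer_list)) > 1: answer = -1; return answer'
def finishA (st : List Int × Int) : Int :=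
  match PySem.List.max? st.1 (fun y => y) with
  | none => 0  -- Python raises ValueError here (empty array); excluded by Pre_solution
  | some m => if st.1.count m > 1 then -1 else st.2

def solution (array : List Int) : Int :=
  finishA ((PySem.Set.ofList array).foldl (stepA (fun i => (array.count i : Int))) ([], 0))

-- ===== PORT B =====
-- one iteration of B's scan over counts.items(): state = (best_cnt, best_val, tie)
def stepB (st : Int × Int × Bool) (vc : Int × Int) : Int × Int × Bool :=
  if vc.2 > st.1 then (vc.2, vc.1, false)
  else if vc.2 = st.1 then (st.1, st.2.1, true)
  else st

-- B's final line: 'return -1 if tie else best_val'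
def finishB (st : Int × Int × Bool) : Int :=
  if st.2.2 = true then -1 else st.2.1

def solution_alt (array : List Int) : Int :=
  finishB ((array.foldl (fun (d : PySem.Dict Int Int) x => d.insert x (d.getD x 0 + 1)) PySem.Dict.empty).items.foldl stepB (0, -1, false))

-- ===== PRECONDITION & SPEC =====
-- Pre_ excludes only the empty list, on which A raises ValueError (max() of the empty answer_list).
def Pre_solution (array : List Int) : Prop := array ≠ []
instance (array : List Int) : Decidable (Pre_solution array) := by unfold Pre_solution; infer_instance
def pvWitness_solution : List Int := [1, 2, 2]

-- On the empty list A raises ValueError (max() of the empty answer_list) while B returns -1, the "no unique maximum" sentinel.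
def Raises_solution (array : List Int) : Prop := array = []
instance (array : List Int) : Decidable (Raises_solution array) := by unfold Raises_solution; infer_instance
def pvRaiseWitness_solution : List Int := []
def pvRaiseWitnessOut_solution : Int := -1

def Spec_solution (array : List Int) (out : Int) : Prop := out = solution_alt array
instance (array : List Int) (out : Int) : Decidable (Spec_solution array out) := by unfold Spec_solution; infer_instance

-- ===== CLAIM (what is proved, stated in full; the proofs are below) =====
def Claim_equal_solution : Prop := ∀ (array : List Int), Dom_solution array → Pre_solution array → Spec_solution array (solution array)
def Claim_raises_solution : Prop := (∀ (array : List Int), Dom_solution array → Raises_solution array → ¬ Pre_solution array) ∧ (Dom_solution (pvRaiseWitness_solution) ∧ Raises_solution (pvRaiseWitness_solution) ∧ solution_alt (pvRaiseWitness_solution) = pvRaiseWitnessOut_solution)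

-- ===== LEMMAS AND PROOFS =====

-- if a dominates the list, max(l ++ [a]) = a
lemma max_append_of_le (lst : List Int) (a bc : Int)
    (h1 : ∀ y ∈ lst, y ≤ bc) (h2 : bc ≤ a) :
    PySem.List.max? (lst ++ [a]) (fun y => y) = some a := by
  cases hm : PySem.List.max? (lst ++ [a]) (fun y => y) with
  | none => simp [PySem.List.max?_eq_none_iff] at hm
  | some m =>
    have hmem := PySem.List.max?_mem hm
    have hmax := PySem.List.max?_isMax hm
    have ham : a ≤ m := hmax a (by simp)
    have hma : m ≤ a := by
      rcases List.mem_append.mp hmem with h | h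
      · exact le_trans (h1 m h) h2
      · simp at h; omega
    have : m = a := le_antisymm hma ham
    rw [this]

lemma max_append_ne (lst : List Int) (a bc : Int)
    (hbc : bc ∈ lst) (hlt : a < bc) :
    PySem.List.max? (lst ++ [a]) (fun y => y) ≠ some a := by
  intro hm
  have hmax := PySem.List.max?_isMax hm
  have := hmax bc (by simp [hbc])
  omega

-- the coupling invariant between A's (answer_list, answer) and B's (best_cnt, best_val, tie)
lemma loop_inv (cnt : Int → Int) :
    ∀ (ds : List Int), (∀ x ∈ ds, 1 ≤ cnt x) →
    ∀ (lst : List Int) (ans bc bv : Int) (tie : Bool),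
    (∀ y ∈ lst, y ≤ bc) → (lst = [] → bc = 0) → (lst ≠ [] → bc ∈ lst) →
    (tie = decide (lst.count bc > 1)) → (lst ≠ [] → tie = false → ans = bv) →
    (ds.foldl (stepA cnt) (lst, ans)).1 = lst ++ ds.map cnt ∧
    (∀ y ∈ (ds.foldl (stepA cnt) (lst, ans)).1, y ≤ (ds.foldl (fun st x => stepB st (x, cnt x)) (bc, bv, tie)).1) ∧
    ((ds.foldl (stepA cnt) (lst, ans)).1 = [] → (ds.foldl (fun st x => stepB st (x, cnt x)) (bc, bv, tie)).1 = 0) ∧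
    ((ds.foldl (stepA cnt) (lst, ans)).1 ≠ [] → (ds.foldl (fun st x => stepB st (x, cnt x)) (bc, bv, tie)).1 ∈ (ds.foldl (stepA cnt) (lst, ans)).1) ∧
    ((ds.foldl (fun st x => stepB st (x, cnt x)) (bc, bv, tie)).2.2 = decide ((ds.foldl (stepA cnt) (lst, ans)).1.count (ds.foldl (fun st x => stepB st (x, cnt x)) (bc, bv, tie)).1 > 1)) ∧
    ((ds.foldl (stepA cnt) (lst, ans)).1 ≠ [] → (ds.foldl (fun st x => stepB st (x, cnt x)) (bc, bv, tie)).2.2 = false → (ds.foldl (stepA cnt) (lst, ans)).2 = (ds.foldl (fun st x => stepB st (x, cnt x)) (bc, bv, tie)).2.1) := by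
  intro ds
  induction ds with
  | nil =>
    intro _ lst ans bc bv tie h1 h2 h3 h4 h5
    exact ⟨by simp, h1, h2, h3, h4, h5⟩
  | cons x rest ih =>
    intro hpos lst ans bc bv tie h1 h2 h3 h4 h5
    have hx : 1 ≤ cnt x := hpos x (by simp)
    have hrest : ∀ y ∈ rest, 1 ≤ cnt y := fun y hy => hpos y (by simp [hy])
    simp only [List.foldl_cons, List.map_cons]
    rcases lt_trichotomy bc (cnt x) with hgt | heq | hlt
    · -- cnt x > bc : A sets answer := x ; B takes the '>' branch
      have hcond := max_append_of_le lst (cnt x) bc h1 (le_of_lt hgt)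
      have hA : stepA cnt (lst, ans) x = (lst ++ [cnt x], x) := by
        simp [stepA, hcond]
      have hB : stepB (bc, bv, tie) (x, cnt x) = (cnt x, x, false) := by
        simp [stepB, hgt]
      simp only [hA, hB]
      have hnotmem : cnt x ∉ lst := fun h => absurd (h1 _ h) (by omega)
      have := ih hrest (lst ++ [cnt x]) x (cnt x) x false
        (by intro y hy; rcases List.mem_append.mp hy with h | h
            · exact le_trans (h1 y h) (le_of_lt hgt)
            · simp at h; omega)
        (by simp) (by intro _; simp)
        (by simp [List.count_append, List.count_eq_zero.mpr hnotmem])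
        (by intro _ _; rfl)
      simpa [List.append_assoc] using this
    · -- cnt x = bc : then lst ≠ [] (else bc = 0 < cnt x); A sets answer := x ; B sets tie
      have hne : lst ≠ [] := by
        intro h; have := h2 h; omega
      have hbcmem := h3 hne
      have hcond := max_append_of_le lst (cnt x) bc h1 (le_of_eq heq)
      have hA : stepA cnt (lst, ans) x = (lst ++ [cnt x], x) := by
        simp [stepA, hcond]
      have hB : stepB (bc, bv, tie) (x, cnt x) = (bc, bv, true) := by
        simp only [stepB]
        rw [if_neg (by omega), if_pos (by omega)]
      simp only [hA, hB]
      have hcnt : 0 < lst.count bc := List.count_pos_iff.mpr hbcmem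
      have := ih hrest (lst ++ [cnt x]) x bc bv true
        (by intro y hy; rcases List.mem_append.mp hy with h | h
            · exact h1 y h
            · simp at h; omega)
        (by simp) (by intro _; exact List.mem_append.mpr (Or.inl hbcmem))
        (by have hone : List.count bc (lst ++ [cnt x]) = List.count bc lst + 1 := by
              simp [List.count_append, heq]
            rw [hone]; simp; omega)
        (by intro _ h; cases h)
      simpa [List.append_assoc] using this
    · -- cnt x < bc : A's condition is false, B unchanged
      have hne : lst ≠ [] := by
        intro h; have := h2 h; omega
      have hbcmem := h3 hne
      have hcond := max_append_ne lst (cnt x) bc hbcmem hlt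
      have hA : stepA cnt (lst, ans) x = (lst ++ [cnt x], ans) := by
        simp [stepA, hcond]
      have hB : stepB (bc, bv, tie) (x, cnt x) = (bc, bv, tie) := by
        simp only [stepB]
        rw [if_neg (by omega), if_neg (by omega)]
      simp only [hA, hB]
      have := ih hrest (lst ++ [cnt x]) ans bc bv tie
        (by intro y hy; rcases List.mem_append.mp hy with h | h
            · exact h1 y h
            · simp at h; omega)
        (by simp) (by intro _; exact List.mem_append.mpr (Or.inl hbcmem))
        (by have hzero : List.count bc (lst ++ [cnt x]) = List.count bc lst := by
              simp [List.count_append, List.count_singleton]; omega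
            rw [hzero, h4])
        (by intro _ h; exact h5 hne h)
      simpa [List.append_assoc] using this

-- ===== VERDICT (by name: the statement is the Claim_ definition above) =====
theorem solution_spec : Claim_equal_solution := by
  intro array _ hpre
  unfold Spec_solution solution solution_alt
  have hitems : (array.foldl (fun (d : PySem.Dict Int Int) x => d.insert x (d.getD x 0 + 1)) PySem.Dict.empty).items
      = (PySem.Set.ofList array).map (fun k => (k, (array.count k : Int))) := by
    rw [PySem.Dict.foldl_insert_getD_add_one_eq_counter, PySem.Dict.items_counter]
  rw [hitems, List.foldl_map]
  set cnt : Int → Int := fun i => (array.count i : Int) with hcnt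
  have hpos : ∀ x ∈ PySem.Set.ofList array, 1 ≤ cnt x := by
    intro x hx
    have : x ∈ array := (PySem.Set.mem_ofList _ _).mp hx
    have : 0 < array.count x := List.count_pos_iff.mpr this
    simp only [hcnt]; omega
  have hds : PySem.Set.ofList array ≠ [] := by
    intro h
    cases array with
    | nil => exact hpre rfl
    | cons a t =>
      have : a ∈ PySem.Set.ofList (a :: t) := (PySem.Set.mem_ofList _ _).mpr (by simp)
      rw [h] at this; cases this
  obtain ⟨hL, h1, _, h3, h4, h5⟩ := loop_inv cnt (PySem.Set.ofList array) hpos [] 0 0 (-1) false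
    (by simp) (fun _ => rfl) (by simp) (by simp) (by simp)
  set fa := (PySem.Set.ofList array).foldl (stepA cnt) ([], 0) with hfa
  set fb := (PySem.Set.ofList array).foldl (fun st x => stepB st (x, cnt x)) (0, -1, false) with hfb
  have hfane : fa.1 ≠ [] := by
    rw [hL]; simp [hds]
  unfold finishA finishB
  cases hm : PySem.List.max? fa.1 (fun y => y) with
  | none => exact absurd ((PySem.List.max?_eq_none_iff _ _).mp hm) hfane
  | some m =>
    have hmeq : m = fb.1 := by
      have hmem := PySem.List.max?_mem hm
      have hmax := PySem.List.max?_isMax hm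
      exact le_antisymm (h1 m hmem) (hmax fb.1 (h3 hfane))
    rw [hmeq]
    by_cases ht : fa.1.count fb.1 > 1
    · have : fb.2.2 = true := by rw [h4]; simp [ht]
      simp [ht, this]
    · have htf : fb.2.2 = false := by rw [h4]; simp [ht]
      simp [ht, htf, h5 hfane htf]

@[simp] theorem solution_raises : Claim_raises_solution := by
  unfold Claim_raises_solution
  exact ⟨fun array _ hr hp => hp hr, by decide⟩
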